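-- pv_equiv track=rewrite | github.com/HaydenBurker/code-challenges | python/first_letter_shift.py | first_letter_shift
-- ===== SOURCE A (Python) =====
-- def first_letter_shift(text):
--     words = text.split(" ")
--     temp = words[-1][0]
--     first_is_calitalized = words[0][0].isupper()
--
--     for i in reversed(range(len(words))):
--         word = words[i]
--         is_capitalized = word[0].isupper()
--         first_letter = words[(i+len(words)-1)%len(words)][0]
--         words[i] = f'{first_letter.upper() if is_capitalized else first_letter.lower()}{word[1:]}'
--
--
--     words[0] = f'{temp.upper() if first_is_calitalized else temp.lower()}{words[0][1:]}'
--     return " ".join(words)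
-- ===== SOURCE B (Python) =====
-- def first_letter_shift(text):
--     words = text.split(" ")
--     firsts = [w[0] for w in words]
--     rotated = [firsts[-1]] + firsts[:-1]
--     shifted = [(c.upper() if w[0].isupper() else c.lower()) + w[1:]
--                for w, c in zip(words, rotated)]
--     return " ".join(shifted)
-- ===== Notes on version B (the rewrite author's own statement) =====
-- stated objective: simpler
-- what changed: Replaces A's reversed in-place mutation loop with its temp variable and modular indexing by precomputing the rotated table of original first letters and building the result in one forward zip comprehension.
import Mathlib
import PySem

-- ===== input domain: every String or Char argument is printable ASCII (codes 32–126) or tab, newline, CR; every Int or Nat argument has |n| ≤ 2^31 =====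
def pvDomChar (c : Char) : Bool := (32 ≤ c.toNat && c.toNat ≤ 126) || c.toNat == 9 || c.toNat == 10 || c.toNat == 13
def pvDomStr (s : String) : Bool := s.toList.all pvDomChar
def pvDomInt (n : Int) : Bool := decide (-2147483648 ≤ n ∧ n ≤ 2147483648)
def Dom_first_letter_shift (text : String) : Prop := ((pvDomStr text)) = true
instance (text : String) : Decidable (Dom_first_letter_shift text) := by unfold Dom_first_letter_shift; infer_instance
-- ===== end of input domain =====

-- B replaces A's reversed in-place mutation loop (temp variable + modular first-letter indexing)
-- by a precomputed rotated table of first letters consumed in one forward zip pass; objective: simpler.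


-- ===== PORT A =====
def first_letter_shift (text : String) : String :=
  let words := PySem.Chars.splitOn text.toList [' ']
  let n : Int := (words.length : Int)
  let temp := PySem.List.pyGetD (PySem.List.pyGetD words (-1) []) 0 ' '
  let firstIsCapitalized :=
    PySem.Chars.isupper (PySem.List.pyGetD (PySem.List.pyGetD words 0 []) 0 ' ')
  let words := ((PySem.List.pyRange 0 n 1).reverse).foldl (fun ws i =>
      let word := PySem.List.pyGetD ws i []
      let isCapitalized := PySem.Chars.isupper (PySem.List.pyGetD word 0 ' ')
      let firstLetter :=
        PySem.List.pyGetD (PySem.List.pyGetD ws (PySem.Int.mod (i + n - 1) n) []) 0 ' '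
      PySem.List.pySetD ws i
        ((if isCapitalized then PySem.Chars.upperChar firstLetter
          else PySem.Chars.lowerChar firstLetter)
          :: PySem.List.slice word (some 1) none)) words
  let words := PySem.List.pySetD words 0
      ((if firstIsCapitalized then PySem.Chars.upperChar temp else PySem.Chars.lowerChar temp)
        :: PySem.List.slice (PySem.List.pyGetD words 0 []) (some 1) none)
  String.ofList (PySem.Chars.join [' '] words)

-- ===== PORT B =====
def first_letter_shift_alt (text : String) : String :=
  let words := PySem.Chars.splitOn text.toList [' ']
  let firsts := words.map (fun w => PySem.List.pyGetD w 0 ' ')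
  let rotated := PySem.List.pyGetD firsts (-1) ' ' :: PySem.List.slice firsts none (some (-1))
  let shifted := (words.zip rotated).map (fun p =>
      (if PySem.Chars.isupper (PySem.List.pyGetD p.1 0 ' ') then PySem.Chars.upperChar p.2
       else PySem.Chars.lowerChar p.2) :: PySem.List.slice p.1 (some 1) none)
  String.ofList (PySem.Chars.join [' '] shifted)

-- ===== PRECONDITION & SPEC =====
-- Pre_: every space-separated field of the text is nonempty; on the excluded inputs Python A
-- raises IndexError (first character of an empty field), and B raises there too.
def Pre_first_letter_shift (text : String) : Prop :=
  ∀ w ∈ PySem.Chars.splitOn text.toList [' '], w ≠ []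
instance (text : String) : Decidable (Pre_first_letter_shift text) := by
  unfold Pre_first_letter_shift; infer_instance
def pvWitness_first_letter_shift : String := "Hello dear world"
def Spec_first_letter_shift (text : String) (out : String) : Prop := out = first_letter_shift_alt text
instance (text : String) (out : String) : Decidable (Spec_first_letter_shift text out) := by unfold Spec_first_letter_shift; infer_instance

-- ===== CLAIM (what is proved, stated in full; the proofs are below) =====
def Claim_equal_first_letter_shift : Prop := ∀ (text : String), Dom_first_letter_shift text → Pre_first_letter_shift text → Spec_first_letter_shift text (first_letter_shift text)

-- ===== LEMMAS AND PROOFS =====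

def pvFirst (w : List Char) : Char := PySem.List.pyGetD w 0 ' '
def pvAdj (w : List Char) (c : Char) : List Char :=
  (if PySem.Chars.isupper (pvFirst w) then PySem.Chars.upperChar c
   else PySem.Chars.lowerChar c) :: w.tail
def pvG (ws : List (List Char)) (j : Nat) : List Char :=
  pvAdj (ws.getD j []) (pvFirst (ws.getD (j - 1) []))

theorem pv_loop_inv (ws : List (List Char)) (d k : Nat) (h1 : 1 ≤ k)
    (h2 : k + d = ws.length) :
    ((PySem.List.pyRange (k : Int) (ws.length : Int) 1).reverse).foldl (fun acc i =>
      PySem.List.pySetD acc i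
        ((if PySem.Chars.isupper (PySem.List.pyGetD (PySem.List.pyGetD acc i []) 0 ' ')
          then PySem.Chars.upperChar (PySem.List.pyGetD (PySem.List.pyGetD acc
            (PySem.Int.mod (i + (ws.length : Int) - 1) (ws.length : Int)) []) 0 ' ')
          else PySem.Chars.lowerChar (PySem.List.pyGetD (PySem.List.pyGetD acc
            (PySem.Int.mod (i + (ws.length : Int) - 1) (ws.length : Int)) []) 0 ' '))
          :: PySem.List.slice (PySem.List.pyGetD acc i []) (some 1) none)) ws
    = ws.take k ++ ((List.range ws.length).drop k).map (pvG ws) := by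
  induction d generalizing k with
  | zero =>
    have hk : k = ws.length := by omega
    subst hk
    rw [PySem.List.pyRange_one_eq_nil (le_refl _)]
    simp
  | succ d ih =>
    have hklen : k < ws.length := by omega
    have hklt : (k : Int) < (ws.length : Int) := by exact_mod_cast hklen
    rw [PySem.List.pyRange_one_cons hklt, List.reverse_cons, List.foldl_append,
        show (k : Int) + 1 = ((k + 1 : Nat) : Int) by push_cast; ring,
        ih (k + 1) (by omega) (by omega)]
    simp only [List.foldl_cons, List.foldl_nil]
    set seg := ((List.range ws.length).drop (k + 1)).map (pvG ws) with hseg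
    have hTget : PySem.List.pyGetD (ws.take (k+1) ++ seg) (k : Int) [] = ws[k] := by
      rw [PySem.List.pyGetD_natCast,
          List.getD_eq_getElem _ _ (by simp [List.length_take]; omega),
          List.getElem_append_left (by simp [List.length_take]; omega)]
      simp
    have hmod : PySem.Int.mod ((k : Int) + (ws.length : Int) - 1) (ws.length : Int)
        = ((k - 1 : Nat) : Int) := by
      rw [PySem.Int.mod_eq_emod_of_pos (by omega),
          show (k : Int) + (ws.length : Int) - 1 = ((k:Int) - 1) + 1 * (ws.length : Int) by ring,
          Int.add_mul_emod_self_right, Int.emod_eq_of_lt (by omega) (by omega)]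
      omega
    have hTget' : PySem.List.pyGetD (ws.take (k+1) ++ seg) ((k - 1 : Nat) : Int) [] = ws[k-1] := by
      rw [PySem.List.pyGetD_natCast,
          List.getD_eq_getElem _ _ (by simp [List.length_take]; omega),
          List.getElem_append_left (by simp [List.length_take]; omega)]
      simp
    rw [hTget, hmod, hTget', PySem.List.pySetD_natCast, PySem.List.slice_from_one,
        show ws.take (k+1) = ws.take k ++ [ws[k]] by
          rw [List.take_add_one, List.getElem?_eq_getElem hklen]; rfl,
        List.append_assoc]
    rw [List.drop_eq_getElem_cons (by simpa using hklen), List.map_cons]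
    simp [pvG, pvAdj, pvFirst, Nat.min_eq_left hklen.le,
          List.getElem?_eq_getElem hklen,
          List.getElem?_eq_getElem (show k - 1 < ws.length by omega), -List.map_drop]
    exact hseg

theorem pv_tail (w0 : List Char) (rest : List (List Char)) :
    ((List.range (w0::rest).length).drop 1).map (pvG (w0::rest))
    = (rest.zip (((w0::rest).map pvFirst).dropLast)).map (fun p =>
        (if PySem.Chars.isupper (PySem.List.pyGetD p.1 0 ' ') then PySem.Chars.upperChar p.2
         else PySem.Chars.lowerChar p.2) :: p.1.tail) := by
  apply List.ext_getElem
  · simp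
  · intro i h1 h2
    simp only [List.getElem_map, List.getElem_drop, List.getElem_range, List.getElem_zip,
      List.getElem_dropLast] at *
    have hi : i < rest.length := by simpa using h1
    simp [pvG, pvAdj, pvFirst, Nat.add_comm 1 i, List.getD_eq_getElem?_getD,
      List.getElem?_eq_getElem hi,
      List.getElem?_eq_getElem (show i < (w0::rest).length by simp; omega)]

theorem pv_core (w0 : List Char) (rest : List (List Char)) :
    (let ws : List (List Char) := w0 :: rest
     let n : Int := (ws.length : Int)
     let temp := PySem.List.pyGetD (PySem.List.pyGetD ws (-1) []) 0 ' '
     let firstCap := PySem.Chars.isupper (PySem.List.pyGetD (PySem.List.pyGetD ws 0 []) 0 ' ')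
     let ws2 := ((PySem.List.pyRange 0 n 1).reverse).foldl (fun acc i =>
        PySem.List.pySetD acc i
          ((if PySem.Chars.isupper (PySem.List.pyGetD (PySem.List.pyGetD acc i []) 0 ' ')
            then PySem.Chars.upperChar (PySem.List.pyGetD (PySem.List.pyGetD acc
              (PySem.Int.mod (i + n - 1) n) []) 0 ' ')
            else PySem.Chars.lowerChar (PySem.List.pyGetD (PySem.List.pyGetD acc
              (PySem.Int.mod (i + n - 1) n) []) 0 ' '))
            :: PySem.List.slice (PySem.List.pyGetD acc i []) (some 1) none)) ws
     PySem.List.pySetD ws2 0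
       ((if firstCap then PySem.Chars.upperChar temp else PySem.Chars.lowerChar temp)
         :: PySem.List.slice (PySem.List.pyGetD ws2 0 []) (some 1) none))
    = (let ws : List (List Char) := w0 :: rest
       let firsts := ws.map (fun w => PySem.List.pyGetD w 0 ' ')
       let rotated := PySem.List.pyGetD firsts (-1) ' ' :: PySem.List.slice firsts none (some (-1))
       (ws.zip rotated).map (fun p =>
         (if PySem.Chars.isupper (PySem.List.pyGetD p.1 0 ' ') then PySem.Chars.upperChar p.2
          else PySem.Chars.lowerChar p.2) :: PySem.List.slice p.1 (some 1) none))
    := by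
  simp only []
  have hlen : (w0 :: rest).length = rest.length + 1 := rfl
  have h01 : PySem.List.pyRange 0 1 1 = [(0:Int)] := by decide
  have hinv := pv_loop_inv (w0 :: rest) rest.length 1 le_rfl (by simp [Nat.add_comm])
  simp only [Nat.cast_one] at hinv
  rw [PySem.List.pyRange_one_append 0 1 ((w0 :: rest).length : Int) (by omega)
        (by simp), h01, List.reverse_append, List.foldl_append, hinv]
  -- the k = 1 state is w0 :: seg1
  rw [show (w0 :: rest).take 1 = [w0] from rfl]
  set seg1 := ((List.range (w0 :: rest).length).drop 1).map (pvG (w0 :: rest)) with hseg1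
  rw [show [w0] ++ seg1 = w0 :: seg1 from rfl]
  simp only [List.reverse_cons, List.reverse_nil, List.nil_append, List.foldl_cons,
    List.foldl_nil]
  have hset : ∀ (x : List Char) (xs : List (List Char)) (v : List Char),
      PySem.List.pySetD (x :: xs) (0:Int) v = v :: xs := by
    intro x xs v
    simp [PySem.List.pySetD_of_nonneg]
  simp only [hset, PySem.List.pyGetD_zero_cons, PySem.List.slice_from_one, List.tail_cons]
  -- B side
  rw [show (fun w => PySem.List.pyGetD w 0 ' ') = pvFirst from rfl,
      PySem.List.slice_to_neg_one]
  have hneg : PySem.List.pyGetD ((w0 :: rest).map pvFirst) (-1) ' '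
      = pvFirst (PySem.List.pyGetD (w0 :: rest) (-1) []) := by
    rw [PySem.List.pyGetD_neg_ofNat _ 1 _ (by omega) (by simp),
        PySem.List.pyGetD_neg_ofNat _ 1 _ (by omega) (by simp)]
    simp only [List.length_map]
    exact List.getElem_map pvFirst
  rw [hneg, List.map_cons, List.zip_cons_cons, List.map_cons]
  congr 1
  rw [hseg1, ← List.map_cons (f := pvFirst) (a := w0) (l := rest)]
  exact pv_tail w0 rest


-- ===== VERDICT (by name: the statement is the Claim_ definition above) =====
theorem first_letter_shift_spec : Claim_equal_first_letter_shift := by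
  intro text hdom hpre
  unfold Spec_first_letter_shift
  simp only [first_letter_shift, first_letter_shift_alt]
  generalize PySem.Chars.splitOn text.toList [' '] = ws
  cases ws with
  | nil => rfl
  | cons w0 rest =>
    exact congrArg (fun l => String.ofList (PySem.Chars.join [' '] l)) (pv_core w0 rest)
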